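-- pv_equiv track=rewrite | github.com/Happy-ryan/PS | 백준/Silver/20493. 세상은 하나의 손수건/세상은 하나의 손수건.py | solution
-- ===== SOURCE A (Python) =====
-- def solution(n, t, arr):
--
--     x, y, dir = 0, 0, 0
--     pre_time = 0
--     post_time = 0
--     # 동(0) 남(1) 서(2) 북(3)
--     dx = [1, 0, -1, 0]
--     dy = [0, -1, 0, 1]
--     for (time, direction) in arr:
--         time = int(time)
--         post_time = time
--
--         x += (post_time - pre_time) * 1 * dx[dir]
--         y += (post_time - pre_time)* 1 * dy[dir]
--
--         if direction == 'right':
--             dir = (dir + 1) % 4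
--         else:
--             dir = (dir - 1) % 4
--
--         t -= (post_time - pre_time)
--         pre_time = post_time
--
--     x += t * 1 * dx[dir]
--     y += t * 1 * dy[dir]
--
--     return x, y
-- ===== SOURCE B (Python) =====
-- def solution(n, t, arr):
--     # Back-to-front frame rotation: first stage extracts the timestamps, then a
--     # reverse scan maintains the displacement of the remaining journey expressed
--     # in the frame where the turtle currently faces east; each turn rotates that
--     # suffix displacement (right: -90deg, left: +90deg) and the straight segment
--     # before it is prepended along the east axis.  No direction index, no (dir+-1)%4.
--     times = [int(time) for time, _ in arr]
--     rx, ry = t - (times[-1] if times else 0), 0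
--     for i in range(len(arr) - 1, -1, -1):
--         if arr[i][1] == 'right':
--             rx, ry = ry, -rx
--         else:
--             rx, ry = -ry, rx
--         rx += times[i] - (times[i - 1] if i > 0 else 0)
--     return rx, ry
-- ===== Notes on version B (the rewrite author's own statement) =====
-- stated objective: alternative
-- what changed: B scans the events back-to-front, maintaining the displacement of the remaining journey in the frame where the turtle currently faces east and rotating it by +-90 degrees at each turn, instead of A's forward simulation with a direction index, (dir+-1)%4 arithmetic, dx/dy tables and a running t countdown.
import Mathlib
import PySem

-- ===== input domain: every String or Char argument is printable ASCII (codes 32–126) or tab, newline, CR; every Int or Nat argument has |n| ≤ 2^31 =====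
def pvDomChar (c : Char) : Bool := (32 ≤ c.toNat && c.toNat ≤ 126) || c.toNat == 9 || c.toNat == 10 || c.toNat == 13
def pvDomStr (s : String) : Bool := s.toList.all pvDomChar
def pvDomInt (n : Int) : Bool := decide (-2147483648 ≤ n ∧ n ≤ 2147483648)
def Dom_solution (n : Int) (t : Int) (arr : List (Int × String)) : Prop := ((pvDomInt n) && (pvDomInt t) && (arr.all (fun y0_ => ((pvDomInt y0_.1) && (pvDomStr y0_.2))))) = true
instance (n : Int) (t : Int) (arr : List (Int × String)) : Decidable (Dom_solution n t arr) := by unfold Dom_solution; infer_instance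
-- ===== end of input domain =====

-- B replaces A's forward simulation (position + direction index, (dir±1)%4) by a
-- back-to-front scan that rotates the suffix displacement at each turn (alternative, same cost).

-- ===== PORT A =====
-- dx[dir] / dy[dir]: Python list indexing; dir stays in {0,1,2,3}, so the .getD 0 default is unreachable.
def dxA (dir : Int) : Int := (PySem.List.pyGet? [1, 0, -1, 0] dir).getD 0
def dyA (dir : Int) : Int := (PySem.List.pyGet? [0, -1, 0, 1] dir).getD 0

-- the for-loop of A over state (x, y, dir, pre_time, t); time = int(time) is the identity on Int
def solutionLoopA : List (Int × String) → Int × Int × Int × Int × Int → Int × Int × Int × Int × Int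
  | [], s => s
  | (time, direction) :: rest, (x, y, dir, pre, t) =>
      let post := time
      let x := x + (post - pre) * 1 * dxA dir
      let y := y + (post - pre) * 1 * dyA dir
      let dir := if direction == "right" then PySem.Int.mod (dir + 1) 4 else PySem.Int.mod (dir - 1) 4
      let t := t - (post - pre)
      solutionLoopA rest (x, y, dir, post, t)

def solution (n : Int) (t : Int) (arr : List (Int × String)) : Int × Int :=
  match solutionLoopA arr (0, 0, 0, 0, t) with
  | (x, y, dir, _, t') => (x + t' * 1 * dxA dir, y + t' * 1 * dyA dir)

-- ===== PORT B =====
-- Source B's reverse index loop, transcribed as the structural recursion that returns through the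
-- list: the unwinding at depth i is loop iteration i, with pre = times[i-1] (0 at i = 0) passed
-- down; the start value (t - times[-1], 0) is the base case, and each return rotates the suffix
-- displacement (right: (rx,ry) := (ry,-rx), left: (rx,ry) := (-ry,rx)) then adds the segment.
def goB (t : Int) : Int → List (Int × String) → Int × Int
  | pre, [] => (t - pre, 0)
  | pre, (time, d) :: rest =>
      match goB t time rest with
      | (rx, ry) =>
        match (if d == "right" then (ry, -rx) else (-ry, rx) : Int × Int) with
        | (rx, ry) => (time - pre + rx, ry)

def solution_alt (n : Int) (t : Int) (arr : List (Int × String)) : Int × Int :=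
  goB t 0 arr

-- ===== PRECONDITION & SPEC =====
def Spec_solution (n : Int) (t : Int) (arr : List (Int × String)) (out : Int × Int) : Prop := out = solution_alt n t arr
instance (n : Int) (t : Int) (arr : List (Int × String)) (out : Int × Int) : Decidable (Spec_solution n t arr out) := by unfold Spec_solution; infer_instance

-- ===== CLAIM (what is proved, stated in full; the proofs are below) =====
def Claim_equal_solution : Prop := ∀ (n : Int) (t : Int) (arr : List (Int × String)), Dom_solution n t arr → Spec_solution n t arr (solution n t arr)

-- ===== LEMMAS AND PROOFS =====

-- proof-side helpers: the finishing step of A, and rotation by dir quarter turns (clockwise)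
def finishA (s : Int × Int × Int × Int × Int) : Int × Int :=
  (s.1 + s.2.2.2.2 * 1 * dxA s.2.2.1, s.2.1 + s.2.2.2.2 * 1 * dyA s.2.2.1)

def rotD (dir : Int) (p : Int × Int) : Int × Int :=
  if dir = 0 then p else if dir = 1 then (p.2, -p.1) else if dir = 2 then (-p.1, -p.2) else (-p.2, p.1)

theorem mod4_range (x : Int) : 0 ≤ PySem.Int.mod x 4 ∧ PySem.Int.mod x 4 < 4 := by
  rw [PySem.Int.mod_eq_emod_of_pos (by norm_num : (0:Int) < 4)]
  exact ⟨Int.emod_nonneg x (by norm_num), Int.emod_lt_of_pos x (by norm_num)⟩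

-- Main invariant: running A's loop from (x, y, dir, pre, t) and finishing equals adding to (x, y)
-- the rotation by dir of B's suffix displacement with total time t + pre.
theorem loop_agree (arr : List (Int × String)) :
    ∀ (x y dir pre t : Int), 0 ≤ dir → dir < 4 →
      finishA (solutionLoopA arr (x, y, dir, pre, t)) =
        (x + (rotD dir (goB (t + pre) pre arr)).1, y + (rotD dir (goB (t + pre) pre arr)).2) := by
  induction arr with
  | nil =>
    intro x y dir pre t h0 h1
    interval_cases dir <;>
      simp [solutionLoopA, goB, finishA, rotD, dxA, dyA, PySem.List.pyGet?, PySem.List.pyIdx?]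
  | cons hd rest ih =>
    intro x y dir pre t h0 h1
    obtain ⟨time, d⟩ := hd
    have hb : 0 ≤ (if (d == "right") then PySem.Int.mod (dir + 1) 4 else PySem.Int.mod (dir - 1) 4) ∧
        (if (d == "right") then PySem.Int.mod (dir + 1) 4 else PySem.Int.mod (dir - 1) 4) < 4 := by
      split <;> exact mod4_range _
    simp only [solutionLoopA]
    rw [ih (x + (time - pre) * 1 * dxA dir) (y + (time - pre) * 1 * dyA dir) _ time
        (t - (time - pre)) hb.1 hb.2]
    have hT : t - (time - pre) + time = t + pre := by ring
    rw [hT]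
    cases hg : goB (t + pre) time rest with
    | mk a b =>
      by_cases hd2 : (d == "right") = true <;>
        [ (have h1' : PySem.Int.mod (dir + 1) 4 = if dir = 3 then 0 else dir + 1 := by
            rw [PySem.Int.mod_eq_emod_of_pos (by norm_num : (0:Int) < 4)]
            interval_cases dir <;> norm_num);
          (have h1' : PySem.Int.mod (dir - 1) 4 = if dir = 0 then 3 else dir - 1 := by
            rw [PySem.Int.mod_eq_emod_of_pos (by norm_num : (0:Int) < 4)]
            interval_cases dir <;> norm_num) ] <;>
      simp only [goB, hg, hd2, if_true, h1'] <;>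
      interval_cases dir <;>
        simp [rotD, dxA, dyA, PySem.List.pyGet?, PySem.List.pyIdx?, Prod.mk.injEq] <;> omega

-- ===== VERDICT (by name: the statement is the Claim_ definition above) =====
theorem solution_spec : Claim_equal_solution := by
  intro n t arr _
  unfold Spec_solution solution solution_alt
  have h := loop_agree arr 0 0 0 0 t (by norm_num) (by norm_num)
  cases hA : solutionLoopA arr (0, 0, 0, 0, t) with
  | mk x s =>
    obtain ⟨y, dir, pre', t'⟩ := s
    rw [hA] at h
    simp only [finishA] at h
    simp only [add_zero] at h
    cases hg : goB t 0 arr with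
    | mk a b =>
      rw [hg] at h
      simp only [rotD] at h
      simpa using h
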